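-- pv_equiv track=rewrite | github.com/aakechin/cutPrimers | cutPrimers.py | getTheMostFitPrimerNumByPos
-- ===== SOURCE A (Python) =====
-- def getTheMostFitPrimerNumByPos(readStart,readLen,maxPrimerLen,coordToPrimerNumChrom):
-- ##    poses=[]
--     primerNumsCovered={}
--     for pos in range(readStart+maxPrimerLen,readStart+readLen+1):
-- ##    # Check the first base after maximal length of primer + position of read
-- ##    poses.append(readStart+maxPrimerLen+1)
-- ##    # Check the middle base between primer sequence and end of read
-- ##    poses.append(int(round((readStart+maxPrimerLen+readStart+readLen)/2,0)))
-- ##    # Check the middle base between two added positions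
-- ##    poses.append(int(round((poses[0]+poses[1])/2,0)))
-- ##    for pos in poses:
--         if pos not in coordToPrimerNumChrom.keys():
--             continue
--         for primerNum in coordToPrimerNumChrom[pos]:
--             if primerNum not in primerNumsCovered.keys():
--                 primerNumsCovered[primerNum]=1
--             else:
--                 primerNumsCovered[primerNum]+=1
--     return(primerNumsCovered)
-- ===== SOURCE B (Python) =====
-- def getTheMostFitPrimerNumByPos(readStart, readLen, maxPrimerLen, coordToPrimerNumChrom):
--     lo = readStart + maxPrimerLen
--     hi = readStart + readLen
--     hits = sorted(((pos, nums) for pos, nums in coordToPrimerNumChrom.items()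
--                    if lo <= pos <= hi), key=lambda item: item[0])
--     counts = {}
--     for _pos, nums in hits:
--         for primerNum in nums:
--             counts[primerNum] = counts.get(primerNum, 0) + 1
--     return counts
-- ===== Notes on version B (the rewrite author's own statement) =====
-- stated objective: alternative
-- what changed: B drives the loop by the dict's items (filtered to the inclusive position window readStart+maxPrimerLen..readStart+readLen and sorted by position) instead of scanning every integer position of the window and testing dict membership; counts use get-with-default instead of a membership branch.
import Mathlib
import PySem

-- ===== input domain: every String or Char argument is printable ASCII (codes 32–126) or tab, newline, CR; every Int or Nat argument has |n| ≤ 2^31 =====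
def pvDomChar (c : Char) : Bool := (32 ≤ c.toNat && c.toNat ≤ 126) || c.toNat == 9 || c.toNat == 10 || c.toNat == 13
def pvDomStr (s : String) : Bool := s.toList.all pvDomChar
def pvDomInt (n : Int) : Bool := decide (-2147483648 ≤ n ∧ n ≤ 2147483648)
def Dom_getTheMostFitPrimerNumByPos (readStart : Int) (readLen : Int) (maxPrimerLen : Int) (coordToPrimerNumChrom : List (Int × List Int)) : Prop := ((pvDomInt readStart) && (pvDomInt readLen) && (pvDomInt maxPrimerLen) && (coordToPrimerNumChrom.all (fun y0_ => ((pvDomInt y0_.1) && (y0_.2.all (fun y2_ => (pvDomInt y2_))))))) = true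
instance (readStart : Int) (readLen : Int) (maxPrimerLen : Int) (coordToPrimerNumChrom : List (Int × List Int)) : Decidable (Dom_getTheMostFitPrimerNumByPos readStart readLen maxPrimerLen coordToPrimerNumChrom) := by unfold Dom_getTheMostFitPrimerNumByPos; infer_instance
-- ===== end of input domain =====

-- B iterates over the dict's items (filtered to the inclusive position window and sorted by
-- position) instead of scanning every position of the window; same per-primer counts
-- (objective: alternative decomposition, same cost).

-- ===== PORT A =====
def getTheMostFitPrimerNumByPos (readStart : Int) (readLen : Int) (maxPrimerLen : Int) (coordToPrimerNumChrom : List (Int × List Int)) : List (Int × Int) :=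
  let d := PySem.Dict.ofList coordToPrimerNumChrom
  ((PySem.List.pyRange (readStart + maxPrimerLen) (readStart + readLen + 1) 1).foldl
    (fun acc pos =>
      match d.get? pos with
      | none => acc                       -- 'if pos not in keys: continue'
      | some primers =>
        primers.foldl
          (fun cov primerNum =>
            if cov.contains primerNum = false then cov.insert primerNum 1
            else cov.modify primerNum 0 (· + 1))   -- primerNumsCovered[primerNum] += 1
          acc)
    PySem.Dict.empty).items

-- ===== PORT B =====
def getTheMostFitPrimerNumByPos_alt (readStart : Int) (readLen : Int) (maxPrimerLen : Int) (coordToPrimerNumChrom : List (Int × List Int)) : List (Int × Int) :=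
  let lo := readStart + maxPrimerLen
  let hi := readStart + readLen
  let hits := PySem.List.sorted
    ((PySem.Dict.ofList coordToPrimerNumChrom).items.filter
      (fun kv => decide (lo ≤ kv.1) && decide (kv.1 ≤ hi)))
    (fun kv => kv.1)
  (hits.foldl
    (fun counts kv =>
      kv.2.foldl (fun c primerNum => c.modify primerNum 0 (· + 1)) counts)
    PySem.Dict.empty).items

-- ===== PRECONDITION & SPEC =====
def Spec_getTheMostFitPrimerNumByPos (readStart : Int) (readLen : Int) (maxPrimerLen : Int) (coordToPrimerNumChrom : List (Int × List Int)) (out : List (Int × Int)) : Prop := out = getTheMostFitPrimerNumByPos_alt readStart readLen maxPrimerLen coordToPrimerNumChrom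
instance (readStart : Int) (readLen : Int) (maxPrimerLen : Int) (coordToPrimerNumChrom : List (Int × List Int)) (out : List (Int × Int)) : Decidable (Spec_getTheMostFitPrimerNumByPos readStart readLen maxPrimerLen coordToPrimerNumChrom out) := by unfold Spec_getTheMostFitPrimerNumByPos; infer_instance

-- ===== CLAIM (what is proved, stated in full; the proofs are below) =====
def Claim_equal_getTheMostFitPrimerNumByPos : Prop := ∀ (readStart : Int) (readLen : Int) (maxPrimerLen : Int) (coordToPrimerNumChrom : List (Int × List Int)), Dom_getTheMostFitPrimerNumByPos readStart readLen maxPrimerLen coordToPrimerNumChrom → Spec_getTheMostFitPrimerNumByPos readStart readLen maxPrimerLen coordToPrimerNumChrom (getTheMostFitPrimerNumByPos readStart readLen maxPrimerLen coordToPrimerNumChrom)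

-- ===== LEMMAS AND PROOFS =====

-- A's branchy counter update is exactly the get-with-default update B uses.
theorem pvUpd_eq (cov : PySem.Dict Int Int) (p : Int) :
    (if cov.contains p = false then cov.insert p 1 else cov.modify p 0 (· + 1))
      = cov.modify p 0 (· + 1) := by
  by_cases h : cov.contains p = false
  · simp [h, PySem.Dict.modify, PySem.Dict.getD_of_not_contains cov 0 h]
  · simp [h]

-- Folding with a skip-on-none lookup equals folding over the filterMap of found pairs.
theorem pvFoldl_opt {α β γ : Type} (h : α → Option β) (f : γ → α → β → γ)
    (step : γ → α → γ)
    (hstep : ∀ acc x, step acc x = match h x with | none => acc | some v => f acc x v) :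
    ∀ (xs : List α) (init : γ),
      xs.foldl step init
        = (xs.filterMap (fun x => (h x).map (fun v => (x, v)))).foldl
            (fun acc xv => f acc xv.1 xv.2) init := by
  intro xs
  induction xs with
  | nil => intro init; rfl
  | cons x xs ih =>
    intro init
    cases hx : h x <;> simp [hx, ih, hstep, List.foldl_cons]

-- The pairs A visits (window positions found in the dict, in increasing position order)
-- are exactly B's sorted filtered item list.
theorem pvHits_eq (lo hi : Int) (c : List (Int × List Int)) :
    PySem.List.sorted
        ((PySem.Dict.ofList c).items.filter
          (fun kv => decide (lo ≤ kv.1) && decide (kv.1 ≤ hi)))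
        (fun kv => kv.1)
      = (PySem.List.pyRange lo (hi + 1) 1).filterMap
          (fun pos => ((PySem.Dict.ofList c).get? pos).map (fun v => (pos, v))) := by
  apply PySem.List.sorted_eq_of_perm_of_pairwise_lt
  · -- permutation: both are Nodup with the same members
    have hkeys := PySem.Dict.nodup_keys_ofList (ν := List Int) c
    have hitems : (PySem.Dict.ofList c).items.Nodup := List.Nodup.of_map _ hkeys
    have hpairlt : ((PySem.List.pyRange lo (hi + 1) 1).filterMap
        (fun pos => ((PySem.Dict.ofList c).get? pos).map (fun v => (pos, v)))).Pairwise
        (fun a b => a.1 < b.1) := by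
      rw [List.pairwise_filterMap]
      refine (PySem.List.pairwise_lt_pyRange_one lo (hi + 1)).imp ?_
      intro a b hab x hx y hy
      cases ha : (PySem.Dict.ofList c).get? a <;> simp [ha] at hx
      cases hb : (PySem.Dict.ofList c).get? b <;> simp [hb] at hy
      simp [← hx, ← hy, hab]
    have hnodupL : ((PySem.List.pyRange lo (hi + 1) 1).filterMap
        (fun pos => ((PySem.Dict.ofList c).get? pos).map (fun v => (pos, v)))).Nodup :=
      List.Pairwise.imp (fun h => by intro he; rw [he] at h; exact lt_irrefl _ h) hpairlt
    rw [List.perm_ext_iff_of_nodup hnodupL (List.Nodup.filter _ hitems)]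
    intro ⟨p, v⟩
    constructor
    · intro hm
      rcases List.mem_filterMap.mp hm with ⟨pos, hpos, heq⟩
      cases hg : (PySem.Dict.ofList c).get? pos <;> simp [hg] at heq
      obtain ⟨he1, he2⟩ := heq
      subst he1; subst he2
      have hmem := (PySem.Dict.get?_eq_some_iff_mem_items _ _ _ hkeys).mp hg
      have hrange := (PySem.List.mem_pyRange_one).mp hpos
      simp [List.mem_filter, hmem]
      omega
    · intro hm
      rw [List.mem_filter] at hm
      obtain ⟨hmem, hrng⟩ := hm
      simp only [decide_eq_true_eq, Bool.and_eq_true] at hrng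
      refine List.mem_filterMap.mpr ⟨p, ?_, ?_⟩
      · exact (PySem.List.mem_pyRange_one).mpr (by omega)
      · rw [PySem.Dict.get?_of_mem_items _ hmem hkeys]; rfl
  · -- strictly increasing positions
    rw [List.pairwise_filterMap]
    refine (PySem.List.pairwise_lt_pyRange_one lo (hi + 1)).imp ?_
    intro a b hab x hx y hy
    cases ha : (PySem.Dict.ofList c).get? a <;> simp [ha] at hx
    cases hb : (PySem.Dict.ofList c).get? b <;> simp [hb] at hy
    simp [← hx, ← hy, hab]

-- ===== VERDICT (by name: the statement is the Claim_ definition above) =====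
theorem getTheMostFitPrimerNumByPos_spec : Claim_equal_getTheMostFitPrimerNumByPos := by
  intro readStart readLen maxPrimerLen c _
  unfold Spec_getTheMostFitPrimerNumByPos
  unfold getTheMostFitPrimerNumByPos getTheMostFitPrimerNumByPos_alt
  simp only [pvUpd_eq, pvHits_eq]
  exact congrArg PySem.Dict.items
    (pvFoldl_opt (fun pos => (PySem.Dict.ofList c).get? pos)
      (fun (acc : PySem.Dict Int Int) (_pos : Int) (primers : List Int) =>
        primers.foldl (fun cov primerNum => PySem.Dict.modify cov primerNum 0 (· + 1)) acc)
      _ (fun acc pos => by cases hg : (PySem.Dict.ofList c).get? pos <;> simp [hg]) _ _)
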